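-- pv_equiv track=rewrite | github.com/d1zm4as/CodeWars | Python/8 Kyu/flick_switch.py | flick_switch
-- ===== SOURCE A (Python) =====
-- def flick_switch(lst):
--     result = []
--     current_value = True  # Start with True
--     for item in lst:
--         if item == 'flick':
--             current_value = not current_value  # Switch the value
--         result.append(current_value)
--     return result
-- ===== SOURCE B (Python) =====
-- def flick_switch(lst):
--     # Stage 1: indices at which a 'flick' occurs.
--     positions = [i for i, x in enumerate(lst) if x == 'flick']
--     # Stage 2: emit alternating constant runs between consecutive flick positions.
--     out = []
--     val, start = True, 0
--     for p in positions:
--         out.extend([val] * (p - start))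
--         val, start = not val, p
--     out.extend([val] * (len(lst) - start))
--     return out
-- ===== Notes on version B (the rewrite author's own statement) =====
-- stated objective: alternative
-- what changed: B first extracts the list of indices where 'flick' occurs, then emits the answer as alternating constant runs (list-replication between consecutive flick positions) instead of A's per-element boolean-toggle pass.
import Mathlib
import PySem

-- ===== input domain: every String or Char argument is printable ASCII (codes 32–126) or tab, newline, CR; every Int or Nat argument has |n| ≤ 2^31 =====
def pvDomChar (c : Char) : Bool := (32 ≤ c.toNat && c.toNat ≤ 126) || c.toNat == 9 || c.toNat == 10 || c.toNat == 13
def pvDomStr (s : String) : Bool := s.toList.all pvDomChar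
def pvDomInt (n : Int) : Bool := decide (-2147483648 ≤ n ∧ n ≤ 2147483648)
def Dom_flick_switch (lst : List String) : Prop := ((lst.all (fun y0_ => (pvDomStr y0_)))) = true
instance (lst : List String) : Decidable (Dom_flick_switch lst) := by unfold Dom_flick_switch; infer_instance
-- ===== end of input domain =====

-- B builds the answer as alternating constant runs from the list of flick positions, instead of A's per-element boolean-toggle pass; objective: alternative decomposition.


-- ===== PORT A =====
def flick_switch (lst : List String) : List Bool :=
  (lst.foldl
    (fun (st : List Bool × Bool) item =>
      let cv := if item = "flick" then !st.2 else st.2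
      (st.1 ++ [cv], cv))
    ([], true)).1

-- ===== PORT B =====
-- Stage 1 of Source B: [i for i, x in enumerate(lst) if x == 'flick'].
-- Stage 2: loop over positions extending `out` with runs [val]*(p-start);
-- Python's list repetition [v]*k is List.replicate k.toNat v (k ≥ 0 here).
def flick_switch_alt (lst : List String) : List Bool :=
  let positions := ((PySem.List.enumerate lst 0).filter (fun p => p.2 == "flick")).map (·.1)
  let st := positions.foldl
    (fun (st : List Bool × Bool × Int) p =>
      (st.1 ++ List.replicate (p - st.2.2).toNat st.2.1, !st.2.1, p))
    ([], true, 0)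
  st.1 ++ List.replicate ((lst.length : Int) - st.2.2).toNat st.2.1

-- ===== PRECONDITION & SPEC =====
def Spec_flick_switch (lst : List String) (out : List Bool) : Prop := out = flick_switch_alt lst
instance (lst : List String) (out : List Bool) : Decidable (Spec_flick_switch lst out) := by unfold Spec_flick_switch; infer_instance

-- ===== CLAIM (what is proved, stated in full; the proofs are below) =====
def Claim_equal_flick_switch : Prop := ∀ (lst : List String), Dom_flick_switch lst → Spec_flick_switch lst (flick_switch lst)

-- ===== LEMMAS AND PROOFS =====

-- Reference function: the toggled-boolean stream both programs produce.
def flickSpec (b : Bool) : List String → List Bool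
  | [] => []
  | s :: rest =>
      let b' := if s = "flick" then !b else b
      b' :: flickSpec b' rest

lemma flick_foldl_eq (lst : List String) :
    ∀ (res : List Bool) (b : Bool),
    (lst.foldl
      (fun (st : List Bool × Bool) item =>
        let cv := if item = "flick" then !st.2 else st.2
        (st.1 ++ [cv], cv))
      (res, b)).1 = res ++ flickSpec b lst := by
  induction lst with
  | nil => intro res b; simp [flickSpec]
  | cons s rest ih =>
      intro res b
      simp only [List.foldl_cons, flickSpec, ih, List.append_assoc]
      rfl

-- positions of "flick" in lst, indexing from i
def posFrom (i : Int) : List String → List Int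
  | [] => []
  | s :: rest => if s = "flick" then i :: posFrom (i + 1) rest else posFrom (i + 1) rest

lemma posFrom_eq_filter (lst : List String) :
    ∀ i : Int, ((PySem.List.enumerate lst i).filter (fun p => p.2 == "flick")).map (·.1)
      = posFrom i lst := by
  induction lst with
  | nil => intro i; simp [PySem.List.enumerate_nil, posFrom]
  | cons s rest ih =>
      intro i
      by_cases hs : s = "flick" <;>
        simp [PySem.List.enumerate_cons, posFrom, hs, ih]

lemma posFrom_ge (lst : List String) : ∀ (i : Int), ∀ q ∈ posFrom i lst, i ≤ q := by
  induction lst with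
  | nil => intro i q hq; simp [posFrom] at hq
  | cons s rest ih =>
      intro i q hq
      by_cases hs : s = "flick" <;> simp [posFrom, hs] at hq
      · rcases hq with h | h
        · omega
        · have := ih (i + 1) q h; omega
      · have := ih (i + 1) q hq; omega

-- runs of constant value between consecutive flick positions
def buildRuns (v : Bool) (start : Int) : List Int → Int → List Bool
  | [], n => List.replicate (n - start).toNat v
  | p :: ps, n => List.replicate (p - start).toNat v ++ buildRuns (!v) p ps n

lemma foldl_runs (ps : List Int) :
    ∀ (acc : List Bool) (v : Bool) (st : Int) (n : Int),
    (let r := ps.foldl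
        (fun (st : List Bool × Bool × Int) p =>
          (st.1 ++ List.replicate (p - st.2.2).toNat st.2.1, !st.2.1, p))
        (acc, v, st);
      r.1 ++ List.replicate (n - r.2.2).toNat r.2.1)
    = acc ++ buildRuns v st ps n := by
  induction ps with
  | nil => intro acc v st n; simp [buildRuns]
  | cons p ps ih =>
      intro acc v st n
      simp only [List.foldl_cons, buildRuns]
      rw [show (∀ x y, (x, y).1 = x) from fun _ _ => rfl] at *
      have := ih (acc ++ List.replicate (p - st).toNat v) (!v) p n
      simpa [List.append_assoc] using this

lemma buildRuns_step (v : Bool) (i : Int) (ps : List Int) (n : Int)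
    (h : match ps with | [] => i + 1 ≤ n | p :: _ => i + 1 ≤ p) :
    buildRuns v i ps n = v :: buildRuns v (i + 1) ps n := by
  cases ps with
  | nil =>
      simp only [buildRuns]
      have : (n - i).toNat = (n - (i + 1)).toNat + 1 := by omega
      rw [this, List.replicate_succ]
  | cons p ps =>
      simp only [buildRuns]
      have : (p - i).toNat = (p - (i + 1)).toNat + 1 := by omega
      rw [this, List.replicate_succ, List.cons_append]

lemma buildRuns_posFrom (lst : List String) :
    ∀ (i : Int) (b : Bool), buildRuns b i (posFrom i lst) (i + lst.length) = flickSpec b lst := by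
  induction lst with
  | nil => intro i b; simp [posFrom, buildRuns, flickSpec]
  | cons s rest ih =>
      intro i b
      have hstep : ∀ (v : Bool),
          buildRuns v i (posFrom (i + 1) rest) (i + (s :: rest).length)
            = v :: buildRuns v (i + 1) (posFrom (i + 1) rest) (i + (s :: rest).length) := by
        intro v
        apply buildRuns_step
        cases hp : posFrom (i + 1) rest with
        | nil => simp only [List.length_cons]; push_cast; omega
        | cons p ps =>
            have : p ∈ posFrom (i + 1) rest := by rw [hp]; exact List.mem_cons_self
            exact posFrom_ge rest (i + 1) p this
      have hn : i + ((s :: rest).length : Int) = (i + 1) + rest.length := by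
        simp only [List.length_cons]; push_cast; omega
      by_cases hs : s = "flick"
      · simp only [posFrom, if_pos hs, buildRuns, Int.sub_self]
        rw [show ((0 : Int)).toNat = 0 from rfl, List.replicate_zero, List.nil_append,
          hstep (!b), hn, ih (i + 1) (!b)]
        simp [flickSpec, hs]
      · simp only [posFrom, if_neg hs]
        rw [hstep b, hn, ih (i + 1) b]
        simp [flickSpec, hs]

-- ===== VERDICT (by name: the statement is the Claim_ definition above) =====
theorem flick_switch_spec : Claim_equal_flick_switch := by
  intro lst _
  unfold Spec_flick_switch flick_switch flick_switch_alt
  rw [posFrom_eq_filter lst 0]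
  have hb := foldl_runs (posFrom 0 lst) [] true 0 (lst.length : Int)
  simp only [List.nil_append] at hb
  have h0 : buildRuns true 0 (posFrom 0 lst) (lst.length : Int) = flickSpec true lst := by
    simpa using buildRuns_posFrom lst 0 true
  rw [hb, h0, flick_foldl_eq lst [] true, List.nil_append]
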